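-- pv_equiv track=rewrite | github.com/AntonArlate/MyFirstNeuroProject | modul.py | neuro_to_item
-- ===== SOURCE A (Python) =====
-- def neuro_to_item (neur_array, item_dict):
--     it=0
--     temp = 0
--     res_dict = {}
--     for item in item_dict:
--         temp = len(item_dict[item])
--         res_dict[item]=neur_array[it:it+len(item_dict[item])]
--         it += temp
--     return res_dict
-- ===== SOURCE B (Python) =====
-- def neuro_to_item(neur_array, item_dict):
--     stream = iter(neur_array)
--     def take(n):
--         chunk = []
--         for _ in range(n):
--             try:
--                 chunk.append(next(stream))
--             except StopIteration:
--                 break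
--         return chunk
--     return {key: take(len(val)) for key, val in item_dict.items()}
-- ===== Notes on version B (the rewrite author's own statement) =====
-- stated objective: alternative
-- what changed: B performs no slicing and keeps no offsets: it consumes a single shared iterator over neur_array, pulling len(val) elements per key (with a StopIteration break when the array runs out), whereas A indexes the array with a running offset and slices it.
import Mathlib
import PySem

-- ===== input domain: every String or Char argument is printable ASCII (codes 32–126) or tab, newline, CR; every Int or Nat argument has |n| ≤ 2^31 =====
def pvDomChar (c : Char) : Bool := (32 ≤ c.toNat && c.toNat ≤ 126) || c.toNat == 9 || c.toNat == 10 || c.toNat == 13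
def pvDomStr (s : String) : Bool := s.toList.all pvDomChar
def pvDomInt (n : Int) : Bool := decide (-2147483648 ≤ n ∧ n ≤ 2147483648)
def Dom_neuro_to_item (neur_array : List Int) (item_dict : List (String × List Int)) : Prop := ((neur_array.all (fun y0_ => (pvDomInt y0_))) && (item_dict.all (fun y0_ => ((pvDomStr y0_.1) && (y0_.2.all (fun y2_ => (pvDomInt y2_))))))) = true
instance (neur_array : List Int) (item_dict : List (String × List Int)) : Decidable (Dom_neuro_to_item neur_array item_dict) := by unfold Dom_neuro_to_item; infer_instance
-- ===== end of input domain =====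

-- B keeps no offsets and never slices: it consumes a single shared stream over neur_array,
-- pulling len(val) elements per key (alternative mechanism; same cost).

-- ===== PORT A =====
-- A: running offset `it`; for each key, look the key up in item_dict, slice, insert, advance.
def neuro_to_item (neur_array : List Int) (item_dict : List (String × List Int)) : List (String × List Int) :=
  (item_dict.foldl
    (fun (st : Int × PySem.Dict String (List Int)) kv =>
      let temp : Int := ((PySem.Dict.mk item_dict).getD kv.1 []).length  -- len(item_dict[item])
      let res := st.2.insert kv.1 (PySem.List.slice neur_array (some st.1) (some (st.1 + temp)))
      (st.1 + temp, res))
    ((0 : Int), PySem.Dict.empty)).2.items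

-- ===== PORT B =====
-- B's helper `take(n)`: pull up to n elements from the stream (the remaining list),
-- breaking early when the stream is exhausted (StopIteration); returns (chunk, rest).
def pvTake : List Int → Nat → (List Int × List Int)
  | rest, 0 => ([], rest)
  | [], _ + 1 => ([], [])
  | x :: r, n + 1 =>
      let p := pvTake r n
      (x :: p.1, p.2)

-- B: dict comprehension over item_dict's items, each step consuming the shared stream.
def neuro_to_item_alt (neur_array : List Int) (item_dict : List (String × List Int)) : List (String × List Int) :=
  (item_dict.foldl
    (fun (st : List Int × PySem.Dict String (List Int)) kv =>
      let p := pvTake st.1 kv.2.length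
      (p.2, st.2.insert kv.1 p.1))
    (neur_array, PySem.Dict.empty)).2.items

-- ===== PRECONDITION & SPEC =====
-- Pre_: item_dict stands for a Python dict, whose keys are necessarily distinct; an
-- association list with duplicate keys corresponds to no Python input, so it is excluded.
def Pre_neuro_to_item (neur_array : List Int) (item_dict : List (String × List Int)) : Prop :=
  (item_dict.map Prod.fst).Nodup
instance (neur_array : List Int) (item_dict : List (String × List Int)) : Decidable (Pre_neuro_to_item neur_array item_dict) := by unfold Pre_neuro_to_item; infer_instance

def pvWitness_neuro_to_item : List Int × (List (String × List Int)) :=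
  ([1, 2, 3, 4, 5], [("a", [7, 7]), ("b", [0]), ("c", [1, 2, 3])])

def Spec_neuro_to_item (neur_array : List Int) (item_dict : List (String × List Int)) (out : List (String × List Int)) : Prop := out = neuro_to_item_alt neur_array item_dict
instance (neur_array : List Int) (item_dict : List (String × List Int)) (out : List (String × List Int)) : Decidable (Spec_neuro_to_item neur_array item_dict out) := by unfold Spec_neuro_to_item; infer_instance

-- ===== CLAIM (what is proved, stated in full; the proofs are below) =====
def Claim_equal_neuro_to_item : Prop := ∀ (neur_array : List Int) (item_dict : List (String × List Int)), Dom_neuro_to_item neur_array item_dict → Pre_neuro_to_item neur_array item_dict → Spec_neuro_to_item neur_array item_dict (neuro_to_item neur_array item_dict)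

-- ===== LEMMAS AND PROOFS =====

-- common reference shape: consume `rest`, emitting (key, chunk) segments
def pvSegs (rest : List Int) : List (String × List Int) → List (String × List Int)
  | [] => []
  | kv :: r => (kv.1, rest.take kv.2.length) :: pvSegs (rest.drop kv.2.length) r

lemma pvTake_eq (rest : List Int) (n : Nat) : pvTake rest n = (rest.take n, rest.drop n) := by
  induction rest generalizing n with
  | nil => cases n <;> simp [pvTake]
  | cons x r ih => cases n <;> simp [pvTake, ih]

lemma pvB_loop (l : List (String × List Int)) :
    ∀ (rest : List Int) (d : PySem.Dict String (List Int)),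
    (l.map Prod.fst).Nodup →
    (∀ kv ∈ l, d.contains kv.1 = false) →
    (l.foldl
      (fun (st : List Int × PySem.Dict String (List Int)) kv =>
        let p := pvTake st.1 kv.2.length
        (p.2, st.2.insert kv.1 p.1))
      (rest, d)).2.items = d.items ++ pvSegs rest l := by
  induction l with
  | nil => intro rest d _ _; simp [pvSegs]
  | cons kv r ih =>
      intro rest d hnd hfresh
      simp only [List.foldl_cons]
      have hfr : d.contains kv.1 = false := hfresh kv (by simp)
      have hrest : ∀ p ∈ r, (d.insert kv.1 (pvTake rest kv.2.length).1).contains p.1 = false := by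
        intro p hp
        rw [PySem.Dict.contains_insert]
        have hne : p.1 ≠ kv.1 := by
          simp only [List.map_cons, List.nodup_cons] at hnd
          intro h; exact hnd.1 (h ▸ List.mem_map_of_mem hp)
        simp [hne, hfresh p (List.mem_cons_of_mem _ hp)]
      rw [ih (pvTake rest kv.2.length).2 _
            (by simpa using (List.nodup_cons.mp (by simpa using hnd)).2) hrest]
      rw [PySem.Dict.items_insert_of_not_contains _ _ hfr]
      simp [pvTake_eq, pvSegs]

lemma pvA_loop (na : List Int) (D : PySem.Dict String (List Int)) :
    ∀ (l : List (String × List Int)) (it : Int) (d : PySem.Dict String (List Int)),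
    0 ≤ it →
    (∀ kv ∈ l, D.getD kv.1 [] = kv.2) →
    (l.map Prod.fst).Nodup →
    (∀ kv ∈ l, d.contains kv.1 = false) →
    (l.foldl
      (fun (st : Int × PySem.Dict String (List Int)) kv =>
        let temp : Int := (D.getD kv.1 []).length
        let res := st.2.insert kv.1 (PySem.List.slice na (some st.1) (some (st.1 + temp)))
        (st.1 + temp, res))
      (it, d)).2.items = d.items ++ pvSegs (na.drop it.toNat) l := by
  intro l
  induction l with
  | nil => intro it d _ _ _ _; simp [pvSegs]
  | cons kv r ih =>
      intro it d hit hget hnd hfresh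
      simp only [List.foldl_cons, pvSegs]
      rw [hget kv (by simp)]
      have hfr : d.contains kv.1 = false := hfresh kv (by simp)
      have hslice : PySem.List.slice na (some it) (some (it + (kv.2.length : Int)))
          = (na.drop it.toNat).take kv.2.length := by
        rw [PySem.List.slice_toNat na hit (by omega)]
        congr 1
        omega
      have hrest : ∀ p ∈ r,
          (d.insert kv.1 (PySem.List.slice na (some it) (some (it + (kv.2.length : Int))))).contains p.1 = false := by
        intro p hp
        rw [PySem.Dict.contains_insert]
        have hne : p.1 ≠ kv.1 := by
          simp only [List.map_cons, List.nodup_cons] at hnd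
          intro h; exact hnd.1 (h ▸ List.mem_map_of_mem hp)
        simp [hne, hfresh p (List.mem_cons_of_mem _ hp)]
      rw [ih (it + kv.2.length) _ (by omega) (fun p hp => hget p (List.mem_cons_of_mem _ hp))
            (by simpa using (List.nodup_cons.mp (by simpa using hnd)).2) hrest]
      rw [PySem.Dict.items_insert_of_not_contains _ _ hfr]
      have hdrop : na.drop (it + (kv.2.length : Int)).toNat
          = (na.drop it.toNat).drop kv.2.length := by
        rw [List.drop_drop]
        congr 1
        omega
      simp [hslice, hdrop]

-- ===== VERDICT (by name: the statement is the Claim_ definition above) =====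
theorem neuro_to_item_spec : Claim_equal_neuro_to_item := by
  intro na l _ hpre
  unfold Spec_neuro_to_item
  have hget : ∀ kv ∈ l, (PySem.Dict.mk l).getD kv.1 [] = kv.2 := by
    intro kv hkv
    exact PySem.Dict.getD_of_mem_items _ (by simpa using hkv)
      (by simpa [PySem.Dict.keys] using hpre) []
  have hA : neuro_to_item na l = PySem.Dict.empty.items ++ pvSegs (na.drop (0 : Int).toNat) l := by
    unfold neuro_to_item
    exact pvA_loop na (PySem.Dict.mk l) l 0 PySem.Dict.empty (by omega) hget hpre
      (fun kv _ => PySem.Dict.contains_empty kv.1)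
  have hB : neuro_to_item_alt na l = PySem.Dict.empty.items ++ pvSegs na l := by
    unfold neuro_to_item_alt
    exact pvB_loop l na PySem.Dict.empty hpre (fun kv _ => PySem.Dict.contains_empty kv.1)
  rw [hA, hB]
  simp
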